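-- pv_equiv track=rewrite | github.com/gabrielfandrade/restaurant-orders | src/analyze_log.py | never_went
-- ===== SOURCE A (Python) =====
-- def never_went(orders: list, client: str):
--     orders_filtered = list(filter(
--         lambda order: order['client'] == client, orders))
--
--     days = set()
--
--     for order in orders:
--         days.add(order['day'])
--
--     for client_order in orders_filtered:
--         days.discard(client_order['day'])
--
--     return days
-- ===== SOURCE B (Python) =====
-- def never_went(orders: list, client: str):
--     by_day = {}
--     for order in orders:
--         by_day.setdefault(order['day'], set()).add(order['client'])
--     return {day for day, clients in by_day.items() if client not in clients}
-- ===== Notes on version B (the rewrite author's own statement) =====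
-- stated objective: alternative
-- what changed: Instead of building one set of all days and then discarding the client's days in a second pass over a filtered copy, B groups orders once into a day->clients index and returns the days whose client-set misses the client.
import Mathlib
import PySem

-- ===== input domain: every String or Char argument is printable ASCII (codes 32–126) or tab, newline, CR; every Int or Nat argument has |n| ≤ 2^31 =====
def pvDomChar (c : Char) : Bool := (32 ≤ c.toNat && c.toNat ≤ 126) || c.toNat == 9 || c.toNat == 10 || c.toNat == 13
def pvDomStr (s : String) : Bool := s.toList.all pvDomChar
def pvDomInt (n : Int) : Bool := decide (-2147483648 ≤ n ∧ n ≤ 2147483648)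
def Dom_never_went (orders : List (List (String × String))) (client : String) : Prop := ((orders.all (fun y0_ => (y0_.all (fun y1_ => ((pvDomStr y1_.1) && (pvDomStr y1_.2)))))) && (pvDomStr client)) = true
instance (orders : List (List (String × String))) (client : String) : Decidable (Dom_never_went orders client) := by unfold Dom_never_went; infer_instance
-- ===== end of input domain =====

-- B changes the traversal (a day→clients grouping index instead of a global day-set with discards); return-value equivalence on Pre_ is proved.

-- order[k] for an order dict (first-match lookup on the association list); Pre_ guarantees the key is present
def pyGetItem (d : List (String × String)) (k : String) : String :=
  ((d.find? (fun p => p.1 == k)).map (·.2)).getD ""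

-- ===== PORT A =====
def never_went (orders : List (List (String × String))) (client : String) : List String :=
  let ordersFiltered := orders.filter (fun order => pyGetItem order "client" == client)
  let days := orders.foldl (fun s order => PySem.Set.add s (pyGetItem order "day")) PySem.Set.empty
  ordersFiltered.foldl (fun s clientOrder => PySem.Set.discard s (pyGetItem clientOrder "day")) days

-- ===== PORT B =====
def never_went_alt (orders : List (List (String × String))) (client : String) : List String :=
  let byDay : PySem.Dict String (PySem.Set String) :=
    orders.foldl
      (fun d order =>
        PySem.Dict.modify d (pyGetItem order "day") PySem.Set.empty
          (fun s => PySem.Set.add s (pyGetItem order "client")))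
      PySem.Dict.empty
  (byDay.items.filter (fun p => !(PySem.Set.contains p.2 client))).map (·.1)

-- ===== PRECONDITION & SPEC =====
-- A (and B) raise KeyError when some order lacks the 'client' or 'day' key; Pre_ excludes exactly those.
def Pre_never_went (orders : List (List (String × String))) (_client : String) : Prop :=
  ∀ order ∈ orders, "client" ∈ order.map (·.1) ∧ "day" ∈ order.map (·.1)
instance (orders : List (List (String × String))) (client : String) : Decidable (Pre_never_went orders client) := by unfold Pre_never_went; infer_instance
def pvWitness_never_went : (List (List (String × String))) × String :=
  ([[("client", "a"), ("day", "mon")], [("client", "b"), ("day", "tue")]], "a")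

def Spec_never_went (orders : List (List (String × String))) (client : String) (out : List String) : Prop := out = never_went_alt orders client
instance (orders : List (List (String × String))) (client : String) (out : List String) : Decidable (Spec_never_went orders client out) := by unfold Spec_never_went; infer_instance

-- ===== CLAIM (what is proved, stated in full; the proofs are below) =====
def Claim_equal_never_went : Prop := ∀ (orders : List (List (String × String))) (client : String), Dom_never_went orders client → Pre_never_went orders client → Spec_never_went orders client (never_went orders client)

-- ===== LEMMAS AND PROOFS =====

-- A's discard loop is a filter of the accumulated set
theorem foldl_discard_eq_filter (l : List (List (String × String))) (s : List String) :
    l.foldl (fun s clientOrder => PySem.Set.discard s (pyGetItem clientOrder "day")) s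
      = s.filter (fun y => l.all (fun o => !(y == pyGetItem o "day"))) := by
  induction l generalizing s with
  | nil => simp
  | cons o t ih =>
    rw [List.foldl_cons, ih, PySem.Set.discard, List.filter_filter]
    apply List.filter_congr
    intro x _
    simp [Bool.and_comm]

-- B's grouping loop, characterised: keys in first-occurrence order, each paired with its client set
theorem foldl_group_items (l : List (List (String × String)))
    (d : PySem.Dict String (PySem.Set String))
    (H : d.items = d.keys.map (fun k => (k, d.getD k PySem.Set.empty))) :
    (l.foldl
      (fun d order =>
        PySem.Dict.modify d (pyGetItem order "day") PySem.Set.empty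
          (fun s => PySem.Set.add s (pyGetItem order "client"))) d).items
      = (PySem.Set.update d.keys (l.map (fun o => pyGetItem o "day"))).map
          (fun k => (k, PySem.Set.update (d.getD k PySem.Set.empty)
            ((l.filter (fun o => pyGetItem o "day" == k)).map (fun o => pyGetItem o "client")))) := by
  induction l generalizing d with
  | nil => simpa [PySem.Set.update] using H
  | cons o t ih =>
    simp only [List.foldl_cons, List.map_cons, List.filter_cons]
    set dayo := pyGetItem o "day" with hday
    set d' := PySem.Dict.modify d dayo PySem.Set.empty (fun s => PySem.Set.add s (pyGetItem o "client")) with hd'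
    have hget : ∀ k, d'.getD k PySem.Set.empty
        = if k = dayo then PySem.Set.add (d.getD dayo PySem.Set.empty) (pyGetItem o "client")
          else d.getD k PySem.Set.empty := by
      intro k; rw [hd']; exact PySem.Dict.getD_modify d dayo k PySem.Set.empty _
    have hkeys : d'.keys = PySem.Set.add d.keys dayo := by
      rw [hd', PySem.Dict.modify]
      by_cases hc : d.contains dayo
      · have hmem : dayo ∈ d.keys := (PySem.Dict.contains_iff_mem_keys d dayo).mp hc
        rw [PySem.Dict.keys_insert_of_contains d _ hc, PySem.Set.add,
            if_pos ((PySem.Set.contains_iff d.keys dayo).mpr hmem)]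
      · have hnmem : dayo ∉ d.keys := fun hm => hc ((PySem.Dict.contains_iff_mem_keys d dayo).mpr hm)
        rw [PySem.Dict.keys_insert_of_not_contains d _ (by simpa using hc), PySem.Set.add,
            if_neg (by simpa using fun hcon => hnmem ((PySem.Set.contains_iff d.keys dayo).mp hcon))]
    have H' : d'.items = d'.keys.map (fun k => (k, d'.getD k PySem.Set.empty)) := by
      by_cases hc : d.contains dayo
      · have hmem : dayo ∈ d.keys := (PySem.Dict.contains_iff_mem_keys d dayo).mp hc
        have hitems : d'.items = d.items.map
            (fun p => if p.1 == dayo then (dayo, PySem.Set.add (d.getD dayo PySem.Set.empty) (pyGetItem o "client")) else p) := by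
          rw [hd', PySem.Dict.modify, PySem.Dict.items_insert_of_contains d _ hc]
        have hk : d'.keys = d.keys := by
          rw [hkeys, PySem.Set.add, if_pos ((PySem.Set.contains_iff d.keys dayo).mpr hmem)]
        rw [hitems, H, hk, List.map_map]
        apply List.map_congr_left
        intro k _
        rw [hget k]; by_cases hkd : k = dayo <;> simp [hkd, Function.comp]
      · have hnone : d.get? dayo = none := by
          rw [PySem.Dict.get?_eq_none_iff_contains]; simpa using hc
        have hnmem : dayo ∉ d.keys := fun hm => hc ((PySem.Dict.contains_iff_mem_keys d dayo).mpr hm)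
        have hitems : d'.items = d.items ++ [(dayo, PySem.Set.add PySem.Set.empty (pyGetItem o "client"))] := by
          rw [hd', PySem.Dict.modify, PySem.Dict.items_insert_of_not_contains d _ (by simpa using hc)]
          simp [PySem.Dict.getD, hnone]
        have hk : d'.keys = d.keys ++ [dayo] := by
          rw [hkeys, PySem.Set.add,
              if_neg (by simpa using fun hcon => hnmem ((PySem.Set.contains_iff d.keys dayo).mp hcon))]
        rw [hitems, H, hk, List.map_append]
        congr 1
        · apply List.map_congr_left
          intro k hkmem
          have hne : k ≠ dayo := fun h => hnmem (h ▸ hkmem)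
          rw [hget k]; simp [hne]
        · simp only [List.map_cons, List.map_nil]
          rw [hget dayo]
          simp [PySem.Dict.getD, hnone, PySem.Set.empty]
    rw [ih d' H', hkeys]
    have hupd : PySem.Set.update d.keys (dayo :: t.map (fun o => pyGetItem o "day"))
        = PySem.Set.update (PySem.Set.add d.keys dayo) (t.map (fun o => pyGetItem o "day")) := by
      simp [PySem.Set.update]
    rw [← hupd, hupd]
    apply List.map_congr_left
    intro k _
    rw [hget k]
    by_cases hkd : k = dayo
    · subst hkd
      simp [PySem.Set.update]
    · have hne : ¬ ((dayo == k) = true) := by simpa using fun h => hkd h.symm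
      simp [hkd, hne]

-- pointwise: "no filtered order has this day" = "client not in this day's client set"
theorem pred_eq (orders : List (List (String × String))) (client y : String) :
    (orders.filter (fun order => pyGetItem order "client" == client)).all
        (fun o => !(y == pyGetItem o "day"))
      = !(PySem.Set.contains
          (PySem.Set.ofList ((orders.filter (fun o => pyGetItem o "day" == y)).map
            (fun o => pyGetItem o "client"))) client) := by
  rw [Bool.eq_iff_iff]
  simp only [List.all_eq_true, List.mem_filter, beq_iff_eq, Bool.not_eq_true',
    Bool.eq_false_iff, Ne, PySem.Set.contains_iff,
    PySem.Set.mem_ofList, List.mem_map, List.mem_filter]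
  constructor
  · intro h hc
    rcases hc with ⟨o, ⟨hoo, hday⟩, hco⟩
    have h2 := h o ⟨hoo, hco⟩
    simp_all
  · intro h o ⟨hoo, hcl⟩
    by_contra hy
    apply h
    refine ⟨o, ⟨hoo, ?_⟩, hcl⟩
    simp_all

-- both results are the same filter of the deduplicated day list
theorem never_went_eq (orders : List (List (String × String))) (client : String) :
    never_went orders client = never_went_alt orders client := by
  unfold never_went never_went_alt
  dsimp only
  rw [foldl_discard_eq_filter,
      foldl_group_items orders PySem.Dict.empty rfl]
  have hdays : orders.foldl (fun s order => PySem.Set.add s (pyGetItem order "day")) PySem.Set.empty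
      = PySem.Set.ofList (orders.map (fun o => pyGetItem o "day")) := by
    rw [PySem.Set.ofList_eq_foldl, List.foldl_map]; rfl
  rw [hdays]
  have hkeys : (PySem.Dict.empty : PySem.Dict String (PySem.Set String)).keys = ([] : List String) := rfl
  rw [hkeys]
  have hupd : PySem.Set.update ([] : List String) (orders.map (fun o => pyGetItem o "day"))
      = PySem.Set.ofList (orders.map (fun o => pyGetItem o "day")) := by
    rw [PySem.Set.ofList_eq_foldl]; rfl
  rw [hupd, List.filter_map, List.map_map]
  have hid : ((fun (p : String × PySem.Set String) => p.1) ∘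
      (fun k => (k, PySem.Set.update ((PySem.Dict.empty : PySem.Dict String (PySem.Set String)).getD k PySem.Set.empty)
        ((orders.filter (fun o => pyGetItem o "day" == k)).map (fun o => pyGetItem o "client")))))
      = fun k => k := rfl
  rw [hid, List.map_id_fun']
  apply List.filter_congr
  intro y _
  have hval : PySem.Set.update ((PySem.Dict.empty : PySem.Dict String (PySem.Set String)).getD y PySem.Set.empty)
      ((orders.filter (fun o => pyGetItem o "day" == y)).map (fun o => pyGetItem o "client"))
      = PySem.Set.ofList ((orders.filter (fun o => pyGetItem o "day" == y)).map (fun o => pyGetItem o "client")) := by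
    rw [PySem.Set.ofList_eq_foldl]; rfl
  simp only [Function.comp_def, hval]
  exact pred_eq orders client y

-- ===== VERDICT (by name: the statement is the Claim_ definition above) =====
theorem never_went_spec : Claim_equal_never_went := by
  intro orders client _ _
  unfold Spec_never_went
  exact never_went_eq orders client
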